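-- pv_equiv track=rewrite | github.com/Rocksus/linkedin-api | linkedin_api/utils/helpers.py | get_list_posts_sorted_without_promoted
-- ===== SOURCE A (Python) =====
-- def get_list_posts_sorted_without_promoted(l_urns, l_posts):
--     """Iterates l_urns and looks for corresponding dicts in l_posts matching 'url' key.
--     If found, removes this dict from l_posts and appends it to the returned list of posts
--
--     :param l_urns: List of posts URNs
--     :type l_urns: list
--     :param l_posts: List of dicts, which each of them is a post
--     :type l_posts: list
--
--     :return: List of dicts, each one of them is a post
--     :rtype: list
--     """
--     l_posts_sorted_without_promoted = []
--     l_posts[:] = [d for d in l_posts if "Promoted" not in d.get("old")]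
--     for urn in l_urns:
--         for post in l_posts:
--             if urn in post["url"]:
--                 l_posts_sorted_without_promoted.append(post)
--                 l_posts[:] = [d for d in l_posts if urn not in d.get("url")]
--                 break
--     return l_posts_sorted_without_promoted
-- ===== SOURCE B (Python) =====
-- def get_list_posts_sorted_without_promoted(l_urns, l_posts):
--     """Alternative decomposition: instead of repeatedly rescanning and rewriting
--     l_posts per urn, compute once per post the index of the FIRST urn contained
--     in its url, build a first-occurrence table urn-index -> post, and read the
--     result off that table in urn order.  Mutates l_posts in place like the
--     original (keeps exactly the never-matched non-promoted posts)."""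
--     non_promoted = [d for d in l_posts if "Promoted" not in d.get("old")]
--
--     def first_urn_index(d):
--         for k, urn in enumerate(l_urns):
--             if urn in d["url"]:
--                 return k
--         return None
--
--     marks = [first_urn_index(d) for d in non_promoted]
--     pick = {}
--     for d, m in zip(non_promoted, marks):
--         if m is not None and m not in pick:
--             pick[m] = d
--     l_posts[:] = [d for d, m in zip(non_promoted, marks) if m is None]
--     return [pick[k] for k in range(len(l_urns)) if k in pick]
-- ===== Notes on version B (the rewrite author's own statement) =====
-- stated objective: alternative
-- what changed: Instead of iterating urns while repeatedly rescanning and rewriting l_posts, B computes once per non-promoted post the index of the first urn contained in its url, builds a first-occurrence table urn-index->post in one pass, and reads the result off that table in urn order; return value and in-place mutation of l_posts are identical on Pre_.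
import Mathlib
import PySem

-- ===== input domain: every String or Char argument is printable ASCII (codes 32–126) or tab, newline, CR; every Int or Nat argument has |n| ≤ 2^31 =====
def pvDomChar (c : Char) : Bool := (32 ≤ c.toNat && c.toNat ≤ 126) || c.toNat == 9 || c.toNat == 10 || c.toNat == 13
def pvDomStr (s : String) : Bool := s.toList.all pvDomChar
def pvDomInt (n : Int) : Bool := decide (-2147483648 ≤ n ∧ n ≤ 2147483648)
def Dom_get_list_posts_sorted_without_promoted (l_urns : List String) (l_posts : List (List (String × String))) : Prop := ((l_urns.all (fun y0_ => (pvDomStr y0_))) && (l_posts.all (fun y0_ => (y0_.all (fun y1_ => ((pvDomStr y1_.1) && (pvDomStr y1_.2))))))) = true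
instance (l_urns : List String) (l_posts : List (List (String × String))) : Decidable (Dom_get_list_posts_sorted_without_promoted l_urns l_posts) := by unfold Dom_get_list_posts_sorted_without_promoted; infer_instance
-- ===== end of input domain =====

-- ===== PORT A =====
-- B changes the decomposition (per-post first-matching-urn table instead of per-urn rescan);
-- A mutates l_posts in place — the equivalence proved here is about the RETURN value only
-- (B's Python performs the same mutation).
-- d.get(k): first-match lookup in the association list
def pvDget (d : List (String × String)) (k : String) : Option String :=
  (d.find? (fun p => p.1 == k)).map (fun p => p.2)

def get_list_posts_sorted_without_promoted (l_urns : List String) (l_posts : List (List (String × String))) : List (List (String × String)) :=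
  -- l_posts[:] = [d for d in l_posts if "Promoted" not in d.get("old")]
  -- ('.getD ""' stands for the key being present; inputs where it is absent raise in Python and are outside Pre_)
  let posts0 := l_posts.filter (fun d => !(PySem.Str.isIn "Promoted" ((pvDget d "old").getD "")))
  (l_urns.foldl (fun st urn =>
      match st.2.find? (fun post => PySem.Str.isIn urn ((pvDget post "url").getD "")) with
      | some post => (st.1 ++ [post], st.2.filter (fun d => !(PySem.Str.isIn urn ((pvDget d "url").getD ""))))
      | none => st)
    (([] : List (List (String × String))), posts0)).1

-- ===== PORT B =====
-- first_urn_index(d): index of the first urn contained in d["url"], None if no urn matches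
-- (reads d["url"] lazily per urn, like Source B; '.getD ""' again stands for the key being present)
def pvFirstUrnIdx : List String → List (String × String) → Option Int
  | [], _ => none
  | u :: us, d =>
    if PySem.Str.isIn u ((pvDget d "url").getD "") then some 0
    else (pvFirstUrnIdx us d).map (fun k => k + 1)

def get_list_posts_sorted_without_promoted_alt (l_urns : List String) (l_posts : List (List (String × String))) : List (List (String × String)) :=
  let nonPromoted := l_posts.filter (fun d => !(PySem.Str.isIn "Promoted" ((pvDget d "old").getD "")))
  let marks := nonPromoted.map (fun d => pvFirstUrnIdx l_urns d)
  let pick := (nonPromoted.zip marks).foldl (fun (pick : PySem.Dict Int (List (String × String))) dm =>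
      match dm.2 with
      | some m => if pick.contains m then pick else pick.insert m dm.1
      | none => pick) PySem.Dict.empty
  -- [pick[k] for k in range(len(l_urns)) if k in pick]
  (PySem.List.pyRange 0 (l_urns.length : Int) 1).filterMap (fun k => pick.get? k)

-- ===== PRECONDITION & SPEC =====
-- Pre_ excludes exactly the inputs on which A raises: a post without an "old" key
-- (TypeError in the first filter) and, when l_urns is nonempty, a non-promoted post
-- without a "url" key (KeyError/TypeError while scanning or filtering); with empty
-- l_urns A never reads "url" and returns [], and so does B.
def Pre_get_list_posts_sorted_without_promoted (l_urns : List String) (l_posts : List (List (String × String))) : Prop :=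
  (∀ d ∈ l_posts, (pvDget d "old").isSome = true) ∧
  (l_urns = [] ∨ ∀ d ∈ l_posts,
    ¬ PySem.Str.isIn "Promoted" ((pvDget d "old").getD "") = true → (pvDget d "url").isSome = true)
instance (l_urns : List String) (l_posts : List (List (String × String))) : Decidable (Pre_get_list_posts_sorted_without_promoted l_urns l_posts) := by unfold Pre_get_list_posts_sorted_without_promoted; infer_instance

def pvWitness_get_list_posts_sorted_without_promoted : List String × (List (List (String × String))) :=
  (["u1"], [[("old", "x"), ("url", "a/u1/b")], [("old", "Promoted post")]])

def Spec_get_list_posts_sorted_without_promoted (l_urns : List String) (l_posts : List (List (String × String))) (out : List (List (String × String))) : Prop := out = get_list_posts_sorted_without_promoted_alt l_urns l_posts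
instance (l_urns : List String) (l_posts : List (List (String × String))) (out : List (List (String × String))) : Decidable (Spec_get_list_posts_sorted_without_promoted l_urns l_posts out) := by unfold Spec_get_list_posts_sorted_without_promoted; infer_instance

-- ===== CLAIM (what is proved, stated in full; the proofs are below) =====
def Claim_equal_get_list_posts_sorted_without_promoted : Prop := ∀ (l_urns : List String) (l_posts : List (List (String × String))), Dom_get_list_posts_sorted_without_promoted l_urns l_posts → Pre_get_list_posts_sorted_without_promoted l_urns l_posts → Spec_get_list_posts_sorted_without_promoted l_urns l_posts (get_list_posts_sorted_without_promoted l_urns l_posts)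

-- ===== LEMMAS AND PROOFS =====

-- abbreviations for the proofs
def pvUrl (d : List (String × String)) : String := (pvDget d "url").getD ""
def pvMatches (u : String) (d : List (String × String)) : Bool := PySem.Str.isIn u (pvUrl d)

-- common recursive middle form: per urn, take the first matching post and drop all matching ones
def pvM : List String → List (List (String × String)) → List (List (String × String))
  | [], _ => []
  | u :: us, posts =>
    match posts.find? (fun p => pvMatches u p) with
    | some p => p :: pvM us (posts.filter (fun d => !(pvMatches u d)))
    | none => pvM us posts

-- A's fold equals pvM
lemma pvA_eq_M (urns : List String) (acc posts : List (List (String × String))) :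
    (urns.foldl (fun st urn =>
      match st.2.find? (fun post => PySem.Str.isIn urn ((pvDget post "url").getD "")) with
      | some post => (st.1 ++ [post], st.2.filter (fun d => !(PySem.Str.isIn urn ((pvDget d "url").getD ""))))
      | none => st)
      (acc, posts)).1 = acc ++ pvM urns posts := by
  induction urns generalizing acc posts with
  | nil => simp [pvM]
  | cons u us ih =>
    simp only [List.foldl_cons, pvM, pvMatches, pvUrl]
    cases h : posts.find? (fun post => PySem.Str.isIn u ((pvDget post "url").getD "")) with
    | none => exact ih acc posts
    | some p => simp only [ih]; simp

-- the first-occurrence dict built by B's fold looks up as find?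
lemma pvPick_get (L : List ((List (String × String)) × Option Int)) (d0 : PySem.Dict Int (List (String × String))) (k : Int) :
    (L.foldl (fun pick dm =>
      match dm.2 with
      | some m => if pick.contains m then pick else pick.insert m dm.1
      | none => pick) d0).get? k
    = (d0.get? k).or ((L.find? (fun dm => dm.2 == some k)).map (fun dm => dm.1)) := by
  induction L generalizing d0 with
  | nil => simp
  | cons dm L ih =>
    simp only [List.foldl_cons, List.find?_cons]
    cases hm : dm.2 with
    | none => simp [ih]
    | some m =>
      by_cases hc : d0.contains m
      · simp only [hc, if_pos]
        rw [ih]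
        by_cases hk : m = k
        · subst hk
          have hs : (d0.get? m).isSome := by rw [← PySem.Dict.contains_eq_isSome_get?]; exact hc
          cases hg : d0.get? m with
          | none => rw [hg] at hs; simp at hs
          | some v => simp
        · have hbeq : (m == k) = false := by simpa using hk
          simp [hbeq]
      · simp only [hc, if_neg, Bool.false_eq_true, not_false_iff]
        rw [ih, PySem.Dict.get?_insert]
        by_cases hk : m = k
        · subst hk
          have hg : d0.get? m = none := by
            rw [PySem.Dict.get?_eq_none_iff_contains]; simpa using hc
          simp [hg]
        · have hbeq : (m == k) = false := by simpa using hk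
          have hk' : ¬ (k = m) := fun h => hk h.symm
          simp [hbeq, hk']

-- find? over zip-with-own-map reads back a find? on the list itself
lemma pvFind_zip_map {α β : Type} (f : α → Option β) (p : Option β → Bool) (l : List α) :
    ((l.zip (l.map f)).find? (fun dm => p dm.2)).map (fun dm => dm.1)
    = l.find? (fun x => p (f x)) := by
  induction l with
  | nil => simp
  | cons x l ih =>
    simp only [List.map_cons, List.zip_cons_cons, List.find?_cons]
    by_cases h : p (f x) <;> simp [h, ih]

lemma pvFirst_nonneg (us : List String) (d : List (String × String)) (v : Int)
    (h : pvFirstUrnIdx us d = some v) : 0 ≤ v := by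
  induction us generalizing v with
  | nil => simp [pvFirstUrnIdx] at h
  | cons u us ih =>
    by_cases hu : PySem.Chars.isIn u.toList ((pvDget d "url").getD "").toList = true
    · simp [pvFirstUrnIdx, hu] at h; omega
    · simp only [pvFirstUrnIdx] at h
      cases hx : pvFirstUrnIdx us d with
      | none => simp [hu, hx] at h
      | some w => simp [hu, hx] at h; have := ih w hx; omega

lemma pvFind?_congr {α : Type} (p q : α → Bool) (l : List α) (h : ∀ x, p x = q x) :
    l.find? p = l.find? q := by
  have hpq : p = q := funext h
  rw [hpq]

lemma pvFirst_zero (u : String) (us : List String) (d : List (String × String)) :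
    (pvFirstUrnIdx (u :: us) d == some 0) = PySem.Str.isIn u (pvUrl d) := by
  by_cases h : PySem.Chars.isIn u.toList ((pvDget d "url").getD "").toList = true
  · simp [pvFirstUrnIdx, pvUrl, h]
  · cases hx : pvFirstUrnIdx us d with
    | none => simp [pvFirstUrnIdx, pvUrl, h, hx]
    | some v => have := pvFirst_nonneg us d v hx; simp [pvFirstUrnIdx, pvUrl, h, hx]; omega

lemma pvFirst_succ (u : String) (us : List String) (d : List (String × String)) (k : Nat) :
    (pvFirstUrnIdx (u :: us) d == some ((k : Int) + 1))
    = (!(PySem.Str.isIn u (pvUrl d)) && (pvFirstUrnIdx us d == some (k : Int))) := by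
  by_cases h : PySem.Chars.isIn u.toList ((pvDget d "url").getD "").toList = true
  · simp [pvFirstUrnIdx, pvUrl, h]
    omega
  · cases hx : pvFirstUrnIdx us d <;> simp [pvFirstUrnIdx, pvUrl, h, hx]

-- the range/filterMap reading of the first-urn-index table equals pvM
lemma pvG_eq_M (urns : List String) (posts : List (List (String × String))) :
    (List.range urns.length).filterMap
      (fun (k : Nat) => posts.find? (fun d => pvFirstUrnIdx urns d == some (k : Int)))
    = pvM urns posts := by
  induction urns generalizing posts with
  | nil => simp [pvM]
  | cons u us ih =>
    rw [List.length_cons, List.range_succ_eq_map, List.filterMap_cons, List.filterMap_map]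
    have hhead : (posts.find? (fun d => pvFirstUrnIdx (u :: us) d == some ((0:Nat) : Int)))
        = posts.find? (fun d => pvMatches u d) := by
      apply pvFind?_congr
      intro d
      simpa [pvMatches] using pvFirst_zero u us d
    have htail :
        ((List.range us.length).filterMap
          ((fun (k : Nat) => posts.find? (fun d => pvFirstUrnIdx (u :: us) d == some (k : Int))) ∘ Nat.succ))
        = (List.range us.length).filterMap
            (fun (k : Nat) => (posts.filter (fun d => !(pvMatches u d))).find?
              (fun d => pvFirstUrnIdx us d == some (k : Int))) := by
      apply List.filterMap_congr
      intro k _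
      simp only [Function.comp]
      rw [List.find?_filter]
      apply pvFind?_congr
      intro d
      have h2 := pvFirst_succ u us d k
      have hc : ((Nat.succ k : Nat) : Int) = (k : Int) + 1 := by push_cast; ring
      rw [hc, h2]
      have hb : (pvFirstUrnIdx us d == some (k : Int))
          = decide (pvFirstUrnIdx us d = some (k : Int)) := by
        rw [Bool.eq_iff_iff]; simp
      simp [pvMatches, hb]
    rw [hhead, htail]
    simp only [pvM]
    cases hf : posts.find? (fun p => pvMatches u p) with
    | some p => rw [ih]
    | none =>
      have hself : posts.filter (fun d => !(pvMatches u d)) = posts := by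
        apply List.filter_eq_self.mpr
        intro d hd
        have := List.find?_eq_none.mp hf d hd
        simpa using this
      rw [hself, ih]

-- B equals pvM on the filtered posts
lemma pvB_eq_M (l_urns : List String) (l_posts : List (List (String × String))) :
    get_list_posts_sorted_without_promoted_alt l_urns l_posts
    = pvM l_urns (l_posts.filter (fun d => !(PySem.Str.isIn "Promoted" ((pvDget d "old").getD "")))) := by
  unfold get_list_posts_sorted_without_promoted_alt
  rw [PySem.List.pyRange_zero_natCast, List.filterMap_map]
  rw [← pvG_eq_M]
  apply List.filterMap_congr
  intro k _
  simp only [Function.comp]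
  rw [pvPick_get, PySem.Dict.get?_empty, Option.none_or]
  exact pvFind_zip_map (fun d => pvFirstUrnIdx l_urns d)
    (fun o => o == some ((k : Nat) : Int)) _

-- ===== VERDICT (by name: the statement is the Claim_ definition above) =====
theorem get_list_posts_sorted_without_promoted_spec : Claim_equal_get_list_posts_sorted_without_promoted := by
  intro l_urns l_posts _ _
  unfold Spec_get_list_posts_sorted_without_promoted get_list_posts_sorted_without_promoted
  rw [pvB_eq_M, pvA_eq_M]
  simp
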